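-- pv_equiv track=rewrite | github.com/ruchiradnaik/AI-Career-Coach | app/job_parser.py | compare_resume_to_jd
-- ===== SOURCE A (Python) =====
-- def compare_resume_to_jd(resume_skills, jd_skills):
--     """
--     Compare skills from resume and job description.
--
--     Args:
--         resume_skills (list): Skills extracted from resume
--         jd_skills (list): Skills extracted from JD
--
--     Returns:
--         dict: matched, missing, suggestions
--     """
--     resume_set = set([s.lower() for s in resume_skills])
--     jd_set = set([s.lower() for s in jd_skills])
--
--     matched = sorted(list(resume_set & jd_set))
--     missing = sorted(list(jd_set - resume_set))
--
--     suggestions = []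
--     if missing:
--         suggestions.append("You may consider learning or adding projects using: " + ", ".join(missing))
--
--     return {
--         "matched_skills": matched,
--         "missing_skills": missing,
--         "suggestions": suggestions
--     }
-- ===== SOURCE B (Python) =====
-- def compare_resume_to_jd(resume_skills, jd_skills):
--     """Sorted-merge (two-pointer) comparison: no set algebra, one walk over two sorted sequences."""
--     rs = sorted({s.lower() for s in resume_skills})
--     matched, missing = [], []
--     i = 0
--     for skill in sorted({s.lower() for s in jd_skills}):
--         while i < len(rs) and rs[i] < skill:
--             i += 1
--         if i < len(rs) and rs[i] == skill:
--             matched.append(skill)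
--         else:
--             missing.append(skill)
--     suggestions = []
--     if missing:
--         suggestions.append("You may consider learning or adding projects using: " + ", ".join(missing))
--     return {
--         "matched_skills": matched,
--         "missing_skills": missing,
--         "suggestions": suggestions
--     }
-- ===== Notes on version B (the rewrite author's own statement) =====
-- stated objective: alternative
-- what changed: Replaces the hash-set algebra (& and -) with a sorted-merge: both deduplicated skill lists are sorted once and a single two-pointer walk over the sorted JD skills against the sorted resume skills classifies each skill as matched or missing, with no membership test or set operation.
import Mathlib
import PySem

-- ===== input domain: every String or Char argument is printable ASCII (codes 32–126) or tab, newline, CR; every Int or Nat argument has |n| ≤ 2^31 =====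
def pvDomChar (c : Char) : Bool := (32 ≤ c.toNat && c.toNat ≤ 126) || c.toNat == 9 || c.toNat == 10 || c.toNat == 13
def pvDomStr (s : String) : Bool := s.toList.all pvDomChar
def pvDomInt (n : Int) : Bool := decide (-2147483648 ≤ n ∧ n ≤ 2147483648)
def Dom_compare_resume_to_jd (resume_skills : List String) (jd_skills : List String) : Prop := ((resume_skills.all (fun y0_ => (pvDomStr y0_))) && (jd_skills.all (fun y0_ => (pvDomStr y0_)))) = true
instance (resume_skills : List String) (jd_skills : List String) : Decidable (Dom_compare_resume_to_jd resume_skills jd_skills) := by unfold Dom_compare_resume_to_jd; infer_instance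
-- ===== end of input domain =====

-- B differs from A only in structure: sorted-merge instead of set algebra; same return value everywhere.

-- ===== PORT A =====
def compare_resume_to_jd (resume_skills : List String) (jd_skills : List String) : List (String × List String) :=
  let resume_set := PySem.Set.ofList (resume_skills.map (fun s => PySem.Str.lower s))
  let jd_set := PySem.Set.ofList (jd_skills.map (fun s => PySem.Str.lower s))
  let matched := PySem.List.sorted (PySem.Set.inter resume_set jd_set) (fun x => x) false
  let missing := PySem.List.sorted (PySem.Set.diff jd_set resume_set) (fun x => x) false
  let suggestions : List String :=
    if missing = [] then []
    else ["You may consider learning or adding projects using: " ++ PySem.Str.join ", " missing]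
  [("matched_skills", matched), ("missing_skills", missing), ("suggestions", suggestions)]

-- ===== PORT B =====
-- the `while i < len(rs) and rs[i] < skill: i += 1` loop of Source B
def pvAdvance (rs : List String) (skill : String) (i : Nat) : Nat :=
  if h : i < rs.length then
    if rs[i] < skill then pvAdvance rs skill (i + 1) else i
  else i
termination_by rs.length - i

-- body of Source B's for-loop: state = (i, matched, missing)
def pvStep2 (rs : List String) (st : Nat × List String × List String) (skill : String) :
    Nat × List String × List String :=
  let i := pvAdvance rs skill st.1
  if h : i < rs.length then
    if rs[i]'h = skill then (i, st.2.1 ++ [skill], st.2.2)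
    else (i, st.2.1, st.2.2 ++ [skill])
  else (i, st.2.1, st.2.2 ++ [skill])

def compare_resume_to_jd_alt (resume_skills : List String) (jd_skills : List String) : List (String × List String) :=
  let rs0 := PySem.List.sorted (PySem.Set.ofList (resume_skills.map (fun s => PySem.Str.lower s))) (fun x => x) false
  let js := PySem.List.sorted (PySem.Set.ofList (jd_skills.map (fun s => PySem.Str.lower s))) (fun x => x) false
  let st := js.foldl (pvStep2 rs0) (0, [], [])
  let matched := st.2.1
  let missing := st.2.2
  let suggestions : List String :=
    if missing = [] then []
    else ["You may consider learning or adding projects using: " ++ PySem.Str.join ", " missing]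
  [("matched_skills", matched), ("missing_skills", missing), ("suggestions", suggestions)]

-- ===== PRECONDITION & SPEC =====
def Spec_compare_resume_to_jd (resume_skills : List String) (jd_skills : List String) (out : List (String × List String)) : Prop := out = compare_resume_to_jd_alt resume_skills jd_skills
instance (resume_skills : List String) (jd_skills : List String) (out : List (String × List String)) : Decidable (Spec_compare_resume_to_jd resume_skills jd_skills out) := by unfold Spec_compare_resume_to_jd; infer_instance

-- ===== CLAIM (what is proved, stated in full; the proofs are below) =====
def Claim_equal_compare_resume_to_jd : Prop := ∀ (resume_skills : List String) (jd_skills : List String), Dom_compare_resume_to_jd resume_skills jd_skills → Spec_compare_resume_to_jd resume_skills jd_skills (compare_resume_to_jd resume_skills jd_skills)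

-- ===== LEMMAS AND PROOFS =====

-- proof-side model of the index walk: the suffix rs.drop i it denotes
def pvDropLt (rest : List String) (skill : String) : List String :=
  match rest with
  | [] => []
  | r :: t => if r < skill then pvDropLt t skill else r :: t

def pvStep (st : List String × List String × List String) (skill : String) :
    List String × List String × List String :=
  let rest := pvDropLt st.1 skill
  match rest with
  | r :: t => if r = skill then (r :: t, st.2.1 ++ [skill], st.2.2)
              else (r :: t, st.2.1, st.2.2 ++ [skill])
  | [] => ([], st.2.1, st.2.2 ++ [skill])

-- pvAdvance advances the index exactly as pvDropLt drops the suffix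
lemma drop_pvAdvance (rs : List String) (s : String) (i : Nat) :
    rs.drop (pvAdvance rs s i) = pvDropLt (rs.drop i) s := by
  induction i using pvAdvance.induct rs s with
  | case1 i h hlt ih =>
    rw [pvAdvance, dif_pos h, if_pos hlt, ih, List.drop_eq_getElem_cons h, pvDropLt, if_pos hlt]
  | case2 i h hlt =>
    rw [pvAdvance, dif_pos h, if_neg hlt, List.drop_eq_getElem_cons h, pvDropLt, if_neg hlt]
  | case3 i h =>
    rw [pvAdvance, dif_neg h, List.drop_eq_nil_of_le (Nat.le_of_not_lt h), pvDropLt]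

-- the index fold and the suffix fold produce the same (matched, missing)
lemma foldl_pvStep2_eq (rs : List String) (js : List String) :
    ∀ (i : Nat) (matched missing : List String),
    (js.foldl (pvStep2 rs) (i, matched, missing)).2 =
      (js.foldl pvStep (rs.drop i, matched, missing)).2 := by
  induction js with
  | nil => intro i matched missing; rfl
  | cons s js' ih =>
    intro i matched missing
    rw [List.foldl_cons, List.foldl_cons]
    have hd : rs.drop (pvAdvance rs s i) = pvDropLt (rs.drop i) s := drop_pvAdvance rs s i
    by_cases h : pvAdvance rs s i < rs.length
    · have hcons : rs.drop (pvAdvance rs s i) = rs[pvAdvance rs s i] :: rs.drop (pvAdvance rs s i + 1) :=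
        List.drop_eq_getElem_cons h
      by_cases he : rs[pvAdvance rs s i]'h = s
      · have h2 : pvStep2 rs (i, matched, missing) s = (pvAdvance rs s i, matched ++ [s], missing) := by
          simp [pvStep2, h, he]
        have h1 : pvStep (rs.drop i, matched, missing) s = (rs.drop (pvAdvance rs s i), matched ++ [s], missing) := by
          simp only [pvStep, ← hd, hcons, if_pos he]
        rw [h1, h2, ih]
      · have h2 : pvStep2 rs (i, matched, missing) s = (pvAdvance rs s i, matched, missing ++ [s]) := by
          simp [pvStep2, h, he]
        have h1 : pvStep (rs.drop i, matched, missing) s = (rs.drop (pvAdvance rs s i), matched, missing ++ [s]) := by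
          simp only [pvStep, ← hd, hcons, if_neg he]
        rw [h1, h2, ih]
    · have hnil : rs.drop (pvAdvance rs s i) = [] := List.drop_eq_nil_of_le (Nat.le_of_not_lt h)
      have h2 : pvStep2 rs (i, matched, missing) s = (pvAdvance rs s i, matched, missing ++ [s]) := by
        simp [pvStep2, h]
      have h1 : pvStep (rs.drop i, matched, missing) s = ([], matched, missing ++ [s]) := by
        simp only [pvStep, ← hd, hnil]
      rw [h1, h2, ih, ← hnil]

-- elements ≥ skill are never dropped by the while-loop
lemma mem_pvDropLt_of_not_lt (rest : List String) (s x : String) (hx : ¬ x < s) :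
    (x ∈ pvDropLt rest s ↔ x ∈ rest) := by
  induction rest with
  | nil => simp [pvDropLt]
  | cons r t ih =>
    by_cases hr : r < s
    · have hxr : x ≠ r := fun h => hx (h ▸ hr)
      simp [pvDropLt, hr, ih, hxr]
    · simp [pvDropLt, hr]

lemma pairwise_pvDropLt (rest : List String) (s : String)
    (h : rest.Pairwise (· < ·)) : (pvDropLt rest s).Pairwise (· < ·) := by
  induction rest with
  | nil => simp [pvDropLt]
  | cons r t ih =>
    rcases List.pairwise_cons.1 h with ⟨h1, h2⟩
    by_cases hr : r < s
    · simpa [pvDropLt, hr] using ih h2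
    · simpa [pvDropLt, hr] using h

-- after the while-loop, the if-test decides membership of skill in rest (rest strictly sorted)
lemma test_pvDropLt (rest : List String) (s : String) (h : rest.Pairwise (· < ·)) :
    (match pvDropLt rest s with | r :: _ => r = s | [] => False) ↔ s ∈ rest := by
  induction rest with
  | nil => simp [pvDropLt]
  | cons r t ih =>
    rcases List.pairwise_cons.1 h with ⟨h1, h2⟩
    by_cases hr : r < s
    · have hne : s ≠ r := fun hsr => absurd (hsr ▸ hr) (lt_irrefl _)
      simpa [pvDropLt, hr, hne] using ih h2
    · simp only [pvDropLt, if_neg hr]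
      constructor
      · intro hrs; exact hrs ▸ List.mem_cons_self
      · intro hs
        rcases List.mem_cons.1 hs with hsr | hst
        · exact hsr.symm
        · exact absurd (h1 s hst) hr

lemma test_pvDropLt' (rest : List String) (s : String) (h : rest.Pairwise (· < ·)) (hs : s ∈ rest) :
    ∃ t, pvDropLt rest s = s :: t := by
  have := (test_pvDropLt rest s h).2 hs
  cases hd : pvDropLt rest s with
  | nil => rw [hd] at this; exact absurd this (by simp)
  | cons r t => rw [hd] at this; exact ⟨t, by rw [this]⟩

lemma test_pvDropLt_not (rest : List String) (s : String) (h : rest.Pairwise (· < ·)) (hs : s ∉ rest) :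
    pvDropLt rest s = [] ∨ ∃ r t, pvDropLt rest s = r :: t ∧ r ≠ s := by
  have hn := fun x => hs ((test_pvDropLt rest s h).1 x)
  cases hd : pvDropLt rest s with
  | nil => exact Or.inl rfl
  | cons r t =>
    refine Or.inr ⟨r, t, rfl, fun hrs => ?_⟩
    rw [hd] at hn; exact hn hrs

-- the fold computes (matched ++ filter, missing ++ filter-not) over a strictly sorted js
lemma foldl_pvStep_char (js : List String) (hjs : js.Pairwise (· < ·)) :
    ∀ (rest matched missing : List String), rest.Pairwise (· < ·) →
    (js.foldl pvStep (rest, matched, missing)).2 =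
      (matched ++ js.filter (fun j => decide (j ∈ rest)),
       missing ++ js.filter (fun j => !decide (j ∈ rest))) := by
  induction js with
  | nil => intro rest matched missing _; simp
  | cons s js' ih =>
    intro rest matched missing hrest
    rcases List.pairwise_cons.1 hjs with ⟨hs1, hs2⟩
    have hrest' : (pvDropLt rest s).Pairwise (· < ·) := pairwise_pvDropLt rest s hrest
    have hfme : ∀ (j : String), j ∈ js' → decide (j ∈ pvDropLt rest s) = decide (j ∈ rest) := by
      intro j hj
      have : ¬ j < s := fun hlt => absurd (hlt.trans (hs1 j hj)) (lt_irrefl _)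
      simp [mem_pvDropLt_of_not_lt rest s j this]
    have hfilter : js'.filter (fun j => decide (j ∈ pvDropLt rest s)) = js'.filter (fun j => decide (j ∈ rest)) :=
      List.filter_congr hfme
    have hfilter' : js'.filter (fun j => !decide (j ∈ pvDropLt rest s)) = js'.filter (fun j => !decide (j ∈ rest)) :=
      List.filter_congr (by intro j hj; rw [hfme j hj])
    by_cases hs : s ∈ rest
    · rcases test_pvDropLt' rest s hrest hs with ⟨t, ht⟩
      have hstep : pvStep (rest, matched, missing) s = (s :: t, matched ++ [s], missing) := by
        simp [pvStep, ht]
      rw [ht] at hfilter hfilter'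
      rw [List.foldl_cons, hstep,
        ih hs2 (s :: t) (matched ++ [s]) missing (ht ▸ hrest'), hfilter, hfilter']
      simp [hs]
    · have hstep : pvStep (rest, matched, missing) s = (pvDropLt rest s, matched, missing ++ [s]) := by
        rcases test_pvDropLt_not rest s hrest hs with hnil | ⟨r, t, hd, hne⟩
        · simp [pvStep, hnil]
        · simp [pvStep, hd, hne]
      rw [List.foldl_cons, hstep, ih hs2 _ matched (missing ++ [s]) hrest', hfilter, hfilter']
      simp [hs]

-- the filtered sorted jd list IS A's sorted intersection / difference
lemma sorted_filter_eq (rs0 js : List String) (base : List String)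
    (hjs : js.Pairwise (· < ·)) (hnodup : base.Nodup)
    (hmem : ∀ x, x ∈ base ↔ x ∈ js.filter (fun j => decide (j ∈ rs0))) :
    PySem.List.sorted base (fun x => x) false = js.filter (fun j => decide (j ∈ rs0)) := by
  apply PySem.List.sorted_eq_of_perm_of_pairwise_lt
  · exact (List.perm_ext_iff_of_nodup ((hjs.imp ne_of_lt).filter _) hnodup).2
      (fun a => (hmem a).symm)
  · exact hjs.filter _

lemma sorted_filter_eq' (rs0 js : List String) (base : List String)
    (hjs : js.Pairwise (· < ·)) (hnodup : base.Nodup)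
    (hmem : ∀ x, x ∈ base ↔ x ∈ js.filter (fun j => !decide (j ∈ rs0))) :
    PySem.List.sorted base (fun x => x) false = js.filter (fun j => !decide (j ∈ rs0)) := by
  apply PySem.List.sorted_eq_of_perm_of_pairwise_lt
  · exact (List.perm_ext_iff_of_nodup ((hjs.imp ne_of_lt).filter _) hnodup).2
      (fun a => (hmem a).symm)
  · exact hjs.filter _

-- ===== VERDICT (by name: the statement is the Claim_ definition above) =====
theorem compare_resume_to_jd_spec : Claim_equal_compare_resume_to_jd := by
  intro resume_skills jd_skills _
  unfold Spec_compare_resume_to_jd compare_resume_to_jd compare_resume_to_jd_alt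
  set R := PySem.Set.ofList (resume_skills.map (fun s => PySem.Str.lower s)) with hR
  set J := PySem.Set.ofList (jd_skills.map (fun s => PySem.Str.lower s)) with hJ
  set rs0 := PySem.List.sorted R (fun x => x) false with hrs0
  set js := PySem.List.sorted J (fun x => x) false with hjs0
  have hjsp : js.Pairwise (· < ·) := by
    rw [hjs0, hJ]; exact PySem.List.sorted_ofList_pairwise_lt _
  have hrsp : rs0.Pairwise (· < ·) := by
    rw [hrs0, hR]; exact PySem.List.sorted_ofList_pairwise_lt _
  have hfold0 := foldl_pvStep_char js hjsp rs0 [] [] hrsp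
  have hfold : (js.foldl (pvStep2 rs0) (0, [], [])).2 =
      ([] ++ js.filter (fun j => decide (j ∈ rs0)), [] ++ js.filter (fun j => !decide (j ∈ rs0))) := by
    rw [foldl_pvStep2_eq rs0 js 0 [] [], List.drop_zero, hfold0]
  have hmemrs : ∀ x, x ∈ rs0 ↔ x ∈ R := fun x => PySem.List.mem_sorted _ _ _ _
  have hmemjs : ∀ x, x ∈ js ↔ x ∈ J := fun x => PySem.List.mem_sorted _ _ _ _
  have hRnd : R.Nodup := PySem.Set.nodup_ofList _
  have hJnd : J.Nodup := PySem.Set.nodup_ofList _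
  have hmatched : PySem.List.sorted (PySem.Set.inter R J) (fun x => x) false
      = js.filter (fun j => decide (j ∈ rs0)) := by
    apply sorted_filter_eq rs0 js _ hjsp (PySem.Set.nodup_inter R J hRnd)
    intro x
    simp only [List.mem_filter, PySem.Set.mem_inter, hmemrs, hmemjs, decide_eq_true_eq]
    tauto
  have hmissing : PySem.List.sorted (PySem.Set.diff J R) (fun x => x) false
      = js.filter (fun j => !decide (j ∈ rs0)) := by
    apply sorted_filter_eq' rs0 js _ hjsp (PySem.Set.nodup_diff J R hJnd)
    intro x
    simp only [List.mem_filter, PySem.Set.mem_diff, hmemrs, hmemjs, Bool.not_eq_eq_eq_not,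
      Bool.not_true, decide_eq_false_iff_not]
  simp only [hmatched, hmissing, hfold]
  simp
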